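-- pv_equiv track=rewrite | github.com/russmckendrick/russ-fm | scrapper/music_collection_manager/utils/artist_orchestrator.py | _select_best_lastfm_image
-- ===== SOURCE A (Python) =====
-- from typing import Dict, Any, Optional, List, Tuple
--
-- def _select_best_lastfm_image(lastfm_images: List[Dict], target_size: int) -> Optional[str]:
--     """Select the best Last.fm image URL for the target size."""
--     if not lastfm_images:
--         return None
--
--     # Last.fm images are usually categorized by size names
--     size_priority = ["extralarge", "large", "medium", "small"]
--
--     # Map target size to preferred Last.fm sizes
--     if target_size >= 1000:
--         preferred_sizes = ["extralarge", "large", "medium", "small"]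
--     elif target_size >= 500:
--         preferred_sizes = ["large", "extralarge", "medium", "small"]
--     else:
--         preferred_sizes = ["medium", "large", "extralarge", "small"]
--
--     # Find the best image based on size preference
--     for size_name in preferred_sizes:
--         for img in lastfm_images:
--             if isinstance(img, dict) and img.get("size") == size_name and img.get("url"):
--                 return img.get("url")
--
--     # Fallback to first available image
--     for img in lastfm_images:
--         if isinstance(img, dict) and img.get("url"):
--             return img.get("url")
--
--     return None
-- ===== SOURCE B (Python) =====
-- def _select_best_lastfm_image(lastfm_images, target_size):
--     """Select the best Last.fm image URL for the target size."""
--     if target_size >= 1000: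
--         preferred_sizes = ["extralarge", "large", "medium", "small"]
--     elif target_size >= 500:
--         preferred_sizes = ["large", "extralarge", "medium", "small"]
--     else:
--         preferred_sizes = ["medium", "large", "extralarge", "small"]
--
--     # One pass: index the first valid url per size name, remember first valid url overall.
--     best_by_size = {}
--     first_any = None
--     for img in lastfm_images:
--         if isinstance(img, dict) and img.get("url"):
--             if first_any is None:
--                 first_any = img.get("url")
--             s = img.get("size")
--             if s is not None and s not in best_by_size:
--                 best_by_size[s] = img.get("url")
--
--     for size_name in preferred_sizes:
--         if size_name in best_by_size:
--             return best_by_size[size_name]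
--     return first_any
-- ===== Notes on version B (the rewrite author's own statement) =====
-- stated objective: simpler
-- what changed: Replaces A's repeated full scans of lastfm_images (one scan per preferred size name, plus a final fallback scan) with a single pass that builds a size->first-valid-url index and remembers the first valid url overall, followed by cheap dictionary lookups in preference order.
import Mathlib
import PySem

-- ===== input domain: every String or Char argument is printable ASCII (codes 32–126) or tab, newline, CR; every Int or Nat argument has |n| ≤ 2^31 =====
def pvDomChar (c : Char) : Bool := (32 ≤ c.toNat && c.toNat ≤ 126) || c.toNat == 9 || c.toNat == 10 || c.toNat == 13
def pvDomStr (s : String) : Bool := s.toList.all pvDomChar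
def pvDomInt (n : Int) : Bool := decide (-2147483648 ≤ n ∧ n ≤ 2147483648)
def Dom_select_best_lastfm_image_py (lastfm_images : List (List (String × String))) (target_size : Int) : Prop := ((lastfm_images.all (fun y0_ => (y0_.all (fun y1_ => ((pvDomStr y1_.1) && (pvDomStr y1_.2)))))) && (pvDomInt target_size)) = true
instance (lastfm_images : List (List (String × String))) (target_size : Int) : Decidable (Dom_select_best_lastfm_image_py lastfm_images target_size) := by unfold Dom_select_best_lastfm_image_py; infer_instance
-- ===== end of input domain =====

-- B replaces A's repeated scans (one scan of the list per preferred size, plus a fallback scan)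
-- with ONE pass building a size→url index and the first-valid-url fallback, then cheap lookups (objective: simpler).

-- img.get(k) on an association-list dict (first match; Python dict keys are unique, lookup = first match here)
def pvDGet (img : List (String × String)) (k : String) : Option String :=
  match img with
  | [] => none
  | (a, b) :: rest => if a == k then some b else pvDGet rest k

-- truthiness of img.get("url"): a present, non-empty string
def pvTruthy : Option String → Bool
  | some u => u != ""
  | none => false

-- ===== PORT A =====
-- inner 'for img in lastfm_images' of the preference loop
def pvScanSize (imgs : List (List (String × String))) (name : String) : Option String :=
  match imgs with
  | [] => none
  | img :: rest =>
    if pvDGet img "size" == some name && pvTruthy (pvDGet img "url") then pvDGet img "url"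
    else pvScanSize rest name

-- outer 'for size_name in preferred_sizes'
def pvScanPref (imgs : List (List (String × String))) (names : List String) : Option String :=
  match names with
  | [] => none
  | n :: rest =>
    match pvScanSize imgs n with
    | some u => some u
    | none => pvScanPref imgs rest

-- 'Fallback to first available image'
def pvFallbackScan (imgs : List (List (String × String))) : Option String :=
  match imgs with
  | [] => none
  | img :: rest => if pvTruthy (pvDGet img "url") then pvDGet img "url" else pvFallbackScan rest

def select_best_lastfm_image_py (lastfm_images : List (List (String × String))) (target_size : Int) : Option String :=
  if lastfm_images = [] then none
  else
    let preferred_sizes :=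
      if target_size ≥ 1000 then ["extralarge", "large", "medium", "small"]
      else if target_size ≥ 500 then ["large", "extralarge", "medium", "small"]
      else ["medium", "large", "extralarge", "small"]
    match pvScanPref lastfm_images preferred_sizes with
    | some u => some u
    | none => pvFallbackScan lastfm_images

-- ===== PORT B =====
-- the single indexing pass: (best_by_size, first_any)
def pvStep (st : PySem.Dict String String × Option String) (img : List (String × String)) :
    PySem.Dict String String × Option String :=
  match pvDGet img "url" with
  | none => st
  | some u =>
    if u != "" then
      let fa := match st.2 with | none => some u | some v => some v
      let best :=
        match pvDGet img "size" with
        | none => st.1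
        | some s => if st.1.contains s then st.1 else st.1.insert s u
      (best, fa)
    else st

def pvBuild (imgs : List (List (String × String))) : PySem.Dict String String × Option String :=
  imgs.foldl pvStep (PySem.Dict.empty, none)

-- 'for size_name in preferred_sizes: if size_name in best_by_size: return …' then 'return first_any'
def pvLookupPref (best : PySem.Dict String String) (names : List String) (fa : Option String) : Option String :=
  match names with
  | [] => fa
  | n :: rest =>
    match best.get? n with
    | some u => some u
    | none => pvLookupPref best rest fa

def select_best_lastfm_image_py_alt (lastfm_images : List (List (String × String))) (target_size : Int) : Option String :=
  let preferred_sizes :=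
    if target_size ≥ 1000 then ["extralarge", "large", "medium", "small"]
    else if target_size ≥ 500 then ["large", "extralarge", "medium", "small"]
    else ["medium", "large", "extralarge", "small"]
  let bf := pvBuild lastfm_images
  pvLookupPref bf.1 preferred_sizes bf.2

-- ===== PRECONDITION & SPEC =====
def Spec_select_best_lastfm_image_py (lastfm_images : List (List (String × String))) (target_size : Int) (out : Option String) : Prop := out = select_best_lastfm_image_py_alt lastfm_images target_size
instance (lastfm_images : List (List (String × String))) (target_size : Int) (out : Option String) : Decidable (Spec_select_best_lastfm_image_py lastfm_images target_size out) := by unfold Spec_select_best_lastfm_image_py; infer_instance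

-- ===== CLAIM (what is proved, stated in full; the proofs are below) =====
def Claim_equal_select_best_lastfm_image_py : Prop := ∀ (lastfm_images : List (List (String × String))) (target_size : Int), Dom_select_best_lastfm_image_py lastfm_images target_size → Spec_select_best_lastfm_image_py lastfm_images target_size (select_best_lastfm_image_py lastfm_images target_size)

-- ===== LEMMAS AND PROOFS =====

-- the index lookup equals A's per-size scan
theorem pvBuild_get? (imgs : List (List (String × String))) (best : PySem.Dict String String)
    (fa : Option String) (name : String) :
    ((imgs.foldl pvStep (best, fa)).1.get? name) =
      ((best.get? name).or (pvScanSize imgs name)) := by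
  induction imgs generalizing best fa with
  | nil => simp [pvScanSize]
  | cons img rest ih =>
    simp only [List.foldl_cons, pvScanSize]
    cases hu : pvDGet img "url" with
    | none =>
      simp [pvStep, hu, pvTruthy, ih]
    | some u =>
      by_cases hne : u = ""
      · simp [pvStep, hu, hne, pvTruthy, ih]
      · simp only [pvStep, hu, pvTruthy, bne_iff_ne, ne_eq, hne, not_false_eq_true, if_true]
        cases hs : pvDGet img "size" with
        | none => simp [ih]
        | some s =>
          by_cases hc : best.contains s = true
          · by_cases hsn : s = name
            · subst hsn
              rcases hg : best.get? s with _ | v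
              · exfalso; rw [PySem.Dict.contains_eq_isSome_get?, hg] at hc; simp at hc
              · simp [ih, hc, hg]
            · simp [ih, hc, hsn]
          · have hg : best.get? s = none := by
              rcases hg : best.get? s with _ | v
              · rfl
              · exfalso; apply hc; rw [PySem.Dict.contains_eq_isSome_get?, hg]; rfl
            by_cases hsn : s = name
            · subst hsn
              simp [ih, hc, PySem.Dict.get?_insert_self, hg, hne]
            · simp [ih, hc, hsn, PySem.Dict.get?_insert_of_ne best u (Ne.symm hsn)]

-- first_any equals A's fallback scan
theorem pvBuild_fa (imgs : List (List (String × String))) (best : PySem.Dict String String)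
    (fa : Option String) :
    (imgs.foldl pvStep (best, fa)).2 = fa.or (pvFallbackScan imgs) := by
  induction imgs generalizing best fa with
  | nil => simp [pvFallbackScan]
  | cons img rest ih =>
    simp only [List.foldl_cons, pvFallbackScan]
    cases hu : pvDGet img "url" with
    | none => simp [pvStep, hu, pvTruthy, ih]
    | some u =>
      by_cases hne : u = ""
      · simp [pvStep, hu, hne, pvTruthy, ih]
      · simp only [pvStep, hu, pvTruthy, bne_iff_ne, ne_eq, hne, not_false_eq_true, if_true]
        cases fa with
        | none => simp [ih]
        | some v => simp [ih]

-- lookups against the index chain exactly like A's preference loop over the same names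
theorem pvLookup_eq (imgs : List (List (String × String))) (names : List String) :
    pvLookupPref (pvBuild imgs).1 names (pvBuild imgs).2 =
      (pvScanPref imgs names).or (pvFallbackScan imgs) := by
  induction names with
  | nil =>
    simp [pvLookupPref, pvScanPref, pvBuild, pvBuild_fa]
  | cons n rest ih =>
    simp only [pvLookupPref, pvScanPref]
    have h := pvBuild_get? imgs PySem.Dict.empty none n
    simp only [pvBuild, PySem.Dict.get?_empty, Option.or] at h ⊢
    rw [h]
    cases pvScanSize imgs n with
    | none => simpa using ih
    | some u => simp

-- ===== VERDICT (by name: the statement is the Claim_ definition above) =====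
theorem select_best_lastfm_image_py_spec : Claim_equal_select_best_lastfm_image_py := by
  intro imgs ts _
  unfold Spec_select_best_lastfm_image_py select_best_lastfm_image_py select_best_lastfm_image_py_alt
  by_cases h : imgs = []
  · subst h
    rw [if_pos rfl]
    split
    · simp [pvBuild, pvLookupPref, PySem.Dict.get?_empty]
    · split <;> simp [pvBuild, pvLookupPref, PySem.Dict.get?_empty]
  · rw [if_neg h, pvLookup_eq]
    cases hsp : pvScanPref imgs
        (if 1000 ≤ ts then ["extralarge", "large", "medium", "small"]
         else if 500 ≤ ts then ["large", "extralarge", "medium", "small"]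
         else ["medium", "large", "extralarge", "small"]) with
    | none => simp [hsp]
    | some u => simp [hsp]
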